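-- pv_equiv track=rewrite | github.com/amlen/artificial-intelligence | assignment3/Code/minimaxFinal.py | insertInLexicalOrder
-- ===== SOURCE A (Python) =====
-- def insertInLexicalOrder(actionList, action):
--     (A, B, C, D) = action
--     newStr = str(A) + " " + str(B) + " " + str(C) + " " + str(D)
--     i = 0
--     while i in range(0, len(actionList)):
--         if(newStr < actionList[i]):
--             break
--         i+=1
--     actionList.insert(i, newStr)
--     return i
-- ===== SOURCE B (Python) =====
-- def insertInLexicalOrder(actionList, action):
--     (A, B, C, D) = action
--     newStr = str(A) + " " + str(B) + " " + str(C) + " " + str(D)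
--
--     def firstGreater(lo, hi):
--         # first index j in [lo, hi) with newStr < actionList[j], else hi
--         if hi - lo <= 1:
--             return lo if lo < hi and newStr < actionList[lo] else hi
--         mid = (lo + hi) // 2
--         l = firstGreater(lo, mid)
--         if l < mid:
--             return l
--         return firstGreater(mid, hi)
--
--     i = firstGreater(0, len(actionList))
--     actionList.insert(i, newStr)
--     return i
-- ===== Notes on version B (the rewrite author's own statement) =====
-- stated objective: alternative
-- what changed: A's left-to-right while-loop with a counter and a break is replaced by a divide-and-conquer recursion on index ranges that returns the leftmost index whose element is strictly greater than newStr (search the left half, fall through to the right half); the in-place insert and the returned index are kept.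
import Mathlib
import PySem

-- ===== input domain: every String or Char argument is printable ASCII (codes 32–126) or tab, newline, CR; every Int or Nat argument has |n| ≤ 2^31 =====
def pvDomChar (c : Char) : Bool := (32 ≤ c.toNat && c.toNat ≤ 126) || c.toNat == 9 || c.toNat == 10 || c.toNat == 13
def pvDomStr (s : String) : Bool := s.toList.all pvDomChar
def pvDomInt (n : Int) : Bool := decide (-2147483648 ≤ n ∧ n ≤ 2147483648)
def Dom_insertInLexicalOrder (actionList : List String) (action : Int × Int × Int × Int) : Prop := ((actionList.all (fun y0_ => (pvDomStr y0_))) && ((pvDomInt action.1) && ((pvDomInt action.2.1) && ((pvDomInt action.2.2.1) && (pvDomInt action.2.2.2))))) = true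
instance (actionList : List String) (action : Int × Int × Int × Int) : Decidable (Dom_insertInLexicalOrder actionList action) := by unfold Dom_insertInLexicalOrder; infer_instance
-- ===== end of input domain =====

-- B replaces A's counter-accumulating while-loop (with break) by a divide-and-conquer
-- recursion on index ranges that finds the leftmost strictly greater element; the proved
-- equivalence is about the RETURN value only — both Pythons also insert newStr into
-- actionList in place at that same index.

-- ===== PORT A =====
-- str(A)+" "+str(B)+" "+str(C)+" "+str(D) (same line in A and in B)
def pvNewStr (action : Int × Int × Int × Int) : String :=
  PySem.Int.toStr action.1 ++ " " ++ PySem.Int.toStr action.2.1 ++ " " ++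
  PySem.Int.toStr action.2.2.1 ++ " " ++ PySem.Int.toStr action.2.2.2
-- the while loop: i walks the list, breaks at the first element strictly greater than newStr
def pvScanA (newStr : String) : List String → Int → Int
  | [], i => i
  | x :: rest, i => if newStr < x then i else pvScanA newStr rest (i + 1)

def insertInLexicalOrder (actionList : List String) (action : Int × Int × Int × Int) : Int :=
  pvScanA (pvNewStr action) actionList 0

-- ===== PORT B =====
-- Source B's firstGreater(lo, hi): first j in [lo, hi) with newStr < actionList[j], else hi.
-- The fuel argument (hi - lo ≤ fuel throughout) only makes the recursion structural;
-- actionList[lo] is read only when lo < hi (Python's short-circuit 'and') with lo < len,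
-- so the getD default "" is never consulted
def pvDC (xs : List String) (s : String) : Nat → Nat → Nat → Nat
  | 0, lo, hi => if lo < hi ∧ s < xs.getD lo "" then lo else hi
  | fuel + 1, lo, hi =>
    if hi - lo ≤ 1 then
      if lo < hi ∧ s < xs.getD lo "" then lo else hi
    else
      let mid := (lo + hi) / 2
      let l := pvDC xs s fuel lo mid
      if l < mid then l else pvDC xs s fuel mid hi

def insertInLexicalOrder_alt (actionList : List String) (action : Int × Int × Int × Int) : Int :=
  ((pvDC actionList (pvNewStr action) actionList.length 0 actionList.length : Nat) : Int)

-- ===== PRECONDITION & SPEC =====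
def Spec_insertInLexicalOrder (actionList : List String) (action : Int × Int × Int × Int) (out : Int) : Prop := out = insertInLexicalOrder_alt actionList action
instance (actionList : List String) (action : Int × Int × Int × Int) (out : Int) : Decidable (Spec_insertInLexicalOrder actionList action out) := by unfold Spec_insertInLexicalOrder; infer_instance

-- ===== CLAIM (what is proved, stated in full; the proofs are below) =====
def Claim_equal_insertInLexicalOrder : Prop := ∀ (actionList : List String) (action : Int × Int × Int × Int), Dom_insertInLexicalOrder actionList action → Spec_insertInLexicalOrder actionList action (insertInLexicalOrder actionList action)

-- ===== LEMMAS AND PROOFS =====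

-- proof-side reference: index of the first element strictly greater than s (length if none)
def pvFG (s : String) : List String → Nat
  | [] => 0
  | x :: rest => if s < x then 0 else 1 + pvFG s rest

theorem pvFG_le_length (s : String) (xs : List String) : pvFG s xs ≤ xs.length := by
  induction xs with
  | nil => simp [pvFG]
  | cons x rest ih =>
    simp only [pvFG, List.length_cons]
    split <;> omega

-- leftmost match in a concatenation: look left, fall through to the right part
theorem pvFG_append (s : String) (u v : List String) :
    pvFG s (u ++ v) = if pvFG s u < u.length then pvFG s u else u.length + pvFG s v := by
  induction u with
  | nil => simp [pvFG]
  | cons x rest ih =>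
    simp only [List.cons_append, pvFG, List.length_cons]
    by_cases h : s < x
    · simp [h]
    · rw [if_neg h, if_neg h, ih]
      have := pvFG_le_length s rest
      split_ifs <;> omega

-- the divide-and-conquer search computes pvFG of the segment [lo, hi)
theorem pvDC_eq_pvFG_segment (xs : List String) (s : String) :
    ∀ (fuel lo hi : Nat), hi - lo ≤ fuel → lo ≤ hi → hi ≤ xs.length →
      pvDC xs s fuel lo hi = lo + pvFG s ((xs.drop lo).take (hi - lo)) := by
  intro fuel
  induction fuel with
  | zero =>
    intro lo hi hn hlh hhl
    have : lo = hi := by omega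
    subst this
    simp [pvDC, pvFG]
  | succ n ih =>
    intro lo hi hn hlh hhl
    by_cases hb : hi - lo ≤ 1
    · rw [pvDC, if_pos hb]
      rcases Nat.eq_or_lt_of_le hlh with heq | hlt
      · subst heq
        simp [pvFG]
      · -- hi = lo + 1
        have hhi : hi = lo + 1 := by omega
        subst hhi
        have hlo : lo < xs.length := by omega
        have hdrop : xs.drop lo = xs[lo] :: xs.drop (lo + 1) := List.drop_eq_getElem_cons hlo
        have hgd : xs.getD lo "" = xs[lo] := List.getD_eq_getElem xs "" hlo
        rw [hgd, hdrop]
        simp only [Nat.add_sub_cancel_left, List.take_succ_cons, List.take_zero, pvFG]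
        by_cases hc : s < xs[lo]
        · simp [hc, hlt]
        · simp [hc]
    · rw [pvDC, if_neg hb]
      have hmidlo : lo ≤ (lo + hi) / 2 := by omega
      have hmidhi : (lo + hi) / 2 ≤ hi := by omega
      have h1 := ih lo ((lo + hi) / 2) (by omega) hmidlo (le_trans hmidhi hhl)
      have h2 := ih ((lo + hi) / 2) hi (by omega) hmidhi hhl
      show (if pvDC xs s n lo ((lo + hi) / 2) < (lo + hi) / 2 then pvDC xs s n lo ((lo + hi) / 2)
        else pvDC xs s n ((lo + hi) / 2) hi) = lo + pvFG s ((xs.drop lo).take (hi - lo))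
      rw [h1, h2]
      -- split the segment [lo, hi) at mid
      have hseg : (xs.drop lo).take (hi - lo) =
          (xs.drop lo).take ((lo + hi) / 2 - lo) ++
          (xs.drop ((lo + hi) / 2)).take (hi - (lo + hi) / 2) := by
        rw [show hi - lo = ((lo + hi) / 2 - lo) + (hi - (lo + hi) / 2) by omega,
          List.take_add, List.drop_drop,
          show lo + ((lo + hi) / 2 - lo) = (lo + hi) / 2 by omega]
      have hlenu : ((xs.drop lo).take ((lo + hi) / 2 - lo)).length = (lo + hi) / 2 - lo := by
        rw [List.length_take, List.length_drop]
        omega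
      rw [hseg, pvFG_append, hlenu]
      have := pvFG_le_length s ((xs.drop lo).take ((lo + hi) / 2 - lo))
      rw [hlenu] at this
      split_ifs <;> omega

-- A's scan is pvFG shifted by the accumulator
theorem pvScanA_eq_pvFG (s : String) (xs : List String) (i : Int) :
    pvScanA s xs i = i + (pvFG s xs : Int) := by
  induction xs generalizing i with
  | nil => simp [pvScanA, pvFG]
  | cons x rest ih =>
    simp only [pvScanA, pvFG]
    by_cases h : s < x
    · simp [h]
    · rw [if_neg h, if_neg h, ih]
      push_cast
      ring

-- ===== VERDICT (by name: the statement is the Claim_ definition above) =====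
theorem insertInLexicalOrder_spec : Claim_equal_insertInLexicalOrder := by
  intro actionList action _hdom
  show _ = _
  unfold insertInLexicalOrder insertInLexicalOrder_alt
  rw [pvScanA_eq_pvFG,
    pvDC_eq_pvFG_segment actionList (pvNewStr action) actionList.length 0 actionList.length
      (by omega) (Nat.zero_le _) (le_refl _)]
  simp
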